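-- pv_equiv track=rewrite | github.com/mfethe1/rosie-openclaw-config | self_improvement/pm_framework/personas.py | _ordered_roles
-- ===== SOURCE A (Python) =====
-- from typing import Dict, Any, List, Optional
--
-- def _ordered_roles(roles: set) -> List[str]:
--     """Return roles in a canonical execution order."""
--     order = [
--         "cpo", "tech_lead", "engineering_manager",
--         "pm", "interviewer", "business_analyst",
--         "ux_designer", "solutions_architect", "data_scientist",
--         "devops", "security", "performance_engineer", "tech_writer",
--         "product_marketing", "sales_engineer", "customer_success", "legal",
--         "chaos_engineer", "ethical_ai", "competitive_intel", "accessibility",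
--         "red", "blue", "qa", "marketing",
--     ]
--     ordered = [r for r in order if r in roles]
--     # Append any roles not in the canonical order
--     for r in sorted(roles):
--         if r not in ordered:
--             ordered.append(r)
--     return ordered
-- ===== SOURCE B (Python) =====
-- from typing import List
--
-- def _ordered_roles(roles: set) -> List[str]:
--     """Return roles in a canonical execution order."""
--     order = [
--         "cpo", "tech_lead", "engineering_manager",
--         "pm", "interviewer", "business_analyst",
--         "ux_designer", "solutions_architect", "data_scientist",
--         "devops", "security", "performance_engineer", "tech_writer",
--         "product_marketing", "sales_engineer", "customer_success", "legal",
--         "chaos_engineer", "ethical_ai", "competitive_intel", "accessibility",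
--         "red", "blue", "qa", "marketing",
--     ]
--     rank = {name: i for i, name in enumerate(order)}
--     return sorted(roles, key=lambda r: (rank.get(r, len(order)), r))
-- ===== Notes on version B (the rewrite author's own statement) =====
-- stated objective: faster
-- what changed: Replaces A's two-phase filter-then-append loop (whose 'r not in ordered' membership scan is quadratic) by one keyed sort over a precomputed rank index: known roles get their canonical index, unknown roles share the sentinel rank len(order) and are tie-broken by name.
import Mathlib
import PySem

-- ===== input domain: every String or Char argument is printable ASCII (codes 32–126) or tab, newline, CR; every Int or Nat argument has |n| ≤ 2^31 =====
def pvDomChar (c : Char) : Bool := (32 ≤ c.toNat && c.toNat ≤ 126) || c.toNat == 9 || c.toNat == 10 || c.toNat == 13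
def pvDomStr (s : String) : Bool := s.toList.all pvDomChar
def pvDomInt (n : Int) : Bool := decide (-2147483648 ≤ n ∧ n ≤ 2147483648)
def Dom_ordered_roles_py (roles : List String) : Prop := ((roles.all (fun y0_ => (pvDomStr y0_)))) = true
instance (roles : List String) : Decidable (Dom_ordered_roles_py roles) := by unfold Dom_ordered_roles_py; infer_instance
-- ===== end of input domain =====

-- B replaces A's canonical-filter pass plus quadratic append loop ('r not in ordered' scan)
-- by a single keyed sort over a precomputed rank index (measured faster; return value only).

-- shared literal: the canonical order list of the Python source
def pvOrder : List String :=
  ["cpo", "tech_lead", "engineering_manager",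
   "pm", "interviewer", "business_analyst",
   "ux_designer", "solutions_architect", "data_scientist",
   "devops", "security", "performance_engineer", "tech_writer",
   "product_marketing", "sales_engineer", "customer_success", "legal",
   "chaos_engineer", "ethical_ai", "competitive_intel", "accessibility",
   "red", "blue", "qa", "marketing"]

-- ===== PORT A =====
def ordered_roles_py (roles : List String) : List String :=
  let order := pvOrder
  let ordered := order.filter (fun r => roles.contains r)
  (PySem.List.sorted roles (fun x => x)).foldl
    (fun acc r => if acc.contains r then acc else acc ++ [r]) ordered

-- ===== PORT B =====
def ordered_roles_py_alt (roles : List String) : List String :=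
  let order := pvOrder
  let rank : PySem.Dict String Int :=
    (PySem.List.enumerate order 0).foldl (fun d p => d.insert p.2 p.1) PySem.Dict.empty
  PySem.List.sorted roles (fun r => toLex (rank.getD r ((order.length : Int)), r))

-- ===== PRECONDITION & SPEC =====
-- Pre_: the Python parameter is a set; its List model holds distinct elements.
def Pre_ordered_roles_py (roles : List String) : Prop := roles.Nodup
instance (roles : List String) : Decidable (Pre_ordered_roles_py roles) := by unfold Pre_ordered_roles_py; infer_instance
def pvWitness_ordered_roles_py : List String := ["qa", "alpha", "cpo"]

def Spec_ordered_roles_py (roles : List String) (out : List String) : Prop := out = ordered_roles_py_alt roles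
instance (roles : List String) (out : List String) : Decidable (Spec_ordered_roles_py roles out) := by unfold Spec_ordered_roles_py; infer_instance

-- ===== CLAIM (what is proved, stated in full; the proofs are below) =====
def Claim_equal_ordered_roles_py : Prop := ∀ (roles : List String), Dom_ordered_roles_py roles → Pre_ordered_roles_py roles → Spec_ordered_roles_py roles (ordered_roles_py roles)

-- ===== LEMMAS AND PROOFS =====

-- the rank index B builds, and its pointwise value
def pvRankDict : PySem.Dict String Int :=
  (PySem.List.enumerate pvOrder 0).foldl (fun d p => d.insert p.2 p.1) PySem.Dict.empty

def pvKey (r : String) : Lex (Int × String) :=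
  toLex (pvRankDict.getD r ((pvOrder.length : Int)), r)

theorem alt_eq_sorted_key (roles : List String) :
    ordered_roles_py_alt roles = PySem.List.sorted roles pvKey := rfl

-- dict built from enumerate: getD is start + index for members, default otherwise
theorem getD_foldl_enumerate (os : List String) (s : Int) (d : PySem.Dict String Int)
    (r : String) (v : Int) (hnd : os.Nodup) :
    ((PySem.List.enumerate os s).foldl (fun d p => d.insert p.2 p.1) d).getD r v
      = if r ∈ os then s + (os.idxOf r : Int) else d.getD r v := by
  induction os generalizing s d with
  | nil => simp [PySem.List.enumerate]
  | cons a os ih =>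
    rw [PySem.List.enumerate_cons]
    simp only [List.foldl_cons]
    rcases List.nodup_cons.mp hnd with ⟨ha, hnd'⟩
    by_cases hra : r = a
    · subst hra
      rw [ih _ _ hnd']
      simp [ha]
    · rw [ih _ _ hnd']
      by_cases hm : r ∈ os
      · simp only [hm, if_true, List.mem_cons, hra, false_or, if_true]
        rw [List.idxOf_cons_ne _ (by exact fun h => hra h.symm)]
        push_cast
        ring
      · simp [hm, hra, PySem.Dict.getD_insert]

theorem pvOrder_nodup : pvOrder.Nodup := by decide

theorem pvRank_mem (r : String) (h : r ∈ pvOrder) :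
    pvRankDict.getD r ((pvOrder.length : Int)) = (pvOrder.idxOf r : Int) := by
  rw [pvRankDict, getD_foldl_enumerate _ _ _ _ _ pvOrder_nodup]
  simp [h]

theorem pvRank_not_mem (r : String) (h : r ∉ pvOrder) :
    pvRankDict.getD r ((pvOrder.length : Int)) = (pvOrder.length : Int) := by
  rw [pvRankDict, getD_foldl_enumerate _ _ _ _ _ pvOrder_nodup]
  simp [h, PySem.Dict.getD, PySem.Dict.get?, PySem.Dict.empty]

-- the dedup-append loop of A, on a duplicate-free source list
theorem foldl_dedup_append (ss : List String) : ∀ (acc : List String), ss.Nodup →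
    ss.foldl (fun acc r => if acc.contains r then acc else acc ++ [r]) acc
      = acc ++ ss.filter (fun r => !acc.contains r) := by
  induction ss with
  | nil => simp
  | cons r ss ih =>
    intro acc hnd
    rcases List.nodup_cons.mp hnd with ⟨hr, hnd'⟩
    by_cases h : acc.contains r
    · rw [List.foldl_cons, if_pos h, List.filter_cons_of_neg (by simpa using h), ih acc hnd']
    · rw [List.foldl_cons, if_neg h, List.filter_cons_of_pos (by simpa using h), ih (acc ++ [r]) hnd']
      have hfc : ss.filter (fun x => !(acc ++ [r]).contains x)
          = ss.filter (fun x => !acc.contains x) := by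
        apply List.filter_congr
        intro x hx
        have hxr : x ≠ r := fun h' => hr (h' ▸ hx)
        simp [hxr]
      rw [hfc, List.append_assoc]
      rfl

-- A's result, in closed form
theorem aChar (roles : List String) (hnd : roles.Nodup) :
    ordered_roles_py roles
      = pvOrder.filter (fun r => roles.contains r)
        ++ (PySem.List.sorted roles (fun x => x)).filter
            (fun r => !(pvOrder.filter (fun r => roles.contains r)).contains r) := by
  have hss : (PySem.List.sorted roles (fun x => x)).Nodup :=
    ((PySem.List.sorted_perm roles (fun x => x) false).nodup_iff).mpr hnd
  exact foldl_dedup_append _ _ hss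

theorem key_lt_iff (a b : String) :
    pvKey a < pvKey b ↔
      pvRankDict.getD a ((pvOrder.length : Int)) < pvRankDict.getD b ((pvOrder.length : Int))
      ∨ (pvRankDict.getD a ((pvOrder.length : Int)) = pvRankDict.getD b ((pvOrder.length : Int)) ∧ a < b) := by
  exact Prod.Lex.toLex_lt_toLex

-- ===== VERDICT (by name: the statement is the Claim_ definition above) =====
theorem ordered_roles_py_spec : Claim_equal_ordered_roles_py := by
  intro roles _ hnd
  unfold Spec_ordered_roles_py
  rw [alt_eq_sorted_key]
  set known := pvOrder.filter (fun r => roles.contains r) with hknown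
  set ss := PySem.List.sorted roles (fun x => x) with hss
  have hssnd : ss.Nodup := ((PySem.List.sorted_perm roles (fun x => x) false).nodup_iff).mpr hnd
  have hssmem : ∀ x, x ∈ ss ↔ x ∈ roles := fun x => PySem.List.mem_sorted _ _ _ _
  set ys := known ++ ss.filter (fun r => !known.contains r) with hys
  have hmem : ∀ x, x ∈ ys ↔ x ∈ roles := by
    intro x
    constructor
    · intro hx
      rcases List.mem_append.mp hx with h | h
      · exact List.contains_iff_mem.mp (List.of_mem_filter h)
      · exact (hssmem x).mp (List.mem_of_mem_filter h)
    · intro hx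
      by_cases hk : x ∈ known
      · exact List.mem_append.mpr (Or.inl hk)
      · refine List.mem_append.mpr (Or.inr ?_)
        refine List.mem_filter.mpr ⟨(hssmem x).mpr hx, ?_⟩
        simp [hk]
  have hysnd : ys.Nodup := by
    rw [hys]
    refine List.Nodup.append (pvOrder_nodup.filter _) (hssnd.filter _) ?_
    intro x hx hx'
    have h1 : x ∉ known := by simpa using List.of_mem_filter hx'
    exact h1 hx
  have hperm : ys.Perm roles := by
    refine List.perm_of_nodup_nodup_toFinset_eq hysnd hnd ?_
    ext x
    simp only [List.mem_toFinset]
    exact hmem x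
  -- rank facts
  have hk_rank : ∀ a ∈ known, pvRankDict.getD a ((pvOrder.length : Int)) = (pvOrder.idxOf a : Int) := by
    intro a ha; exact pvRank_mem a (List.mem_of_mem_filter ha)
  have hf_rank : ∀ b ∈ ss.filter (fun r => !known.contains r),
      pvRankDict.getD b ((pvOrder.length : Int)) = (pvOrder.length : Int) := by
    intro b hb
    have hbr : b ∈ roles := (hssmem b).mp (List.mem_of_mem_filter hb)
    have hbk : b ∉ known := by simpa using List.of_mem_filter hb
    refine pvRank_not_mem b (fun hbo => hbk ?_)
    exact List.mem_filter.mpr ⟨hbo, List.contains_iff_mem.mpr hbr⟩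
  have hpair : ys.Pairwise (fun a b => pvKey a < pvKey b) := by
    rw [hys, List.pairwise_append]
    refine ⟨?_, ?_, ?_⟩
    · -- within known: strictly increasing canonical index
      have h0 : pvOrder.Pairwise (fun a b => pvOrder.idxOf a < pvOrder.idxOf b) := by
        rw [List.pairwise_iff_getElem]
        intro i j hi hj hij
        rw [pvOrder_nodup.idxOf_getElem, pvOrder_nodup.idxOf_getElem]
        exact hij
      have h1 : known.Pairwise (fun a b => pvOrder.idxOf a < pvOrder.idxOf b) :=
        h0.sublist (List.filter_sublist (p := fun r => roles.contains r) (l := pvOrder))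
      refine h1.imp_of_mem ?_
      intro a b ha hb hir
      rw [key_lt_iff, hk_rank a ha, hk_rank b hb]
      exact Or.inl (by exact_mod_cast hir)
    · -- within the remainder: names strictly increasing, ranks equal
      have h0 : ss.Pairwise (fun a b => a < b) := by
        have hle := PySem.List.sorted_pairwise (xs := roles) (key := fun x => x)
        have := hle.and hssnd
        refine this.imp ?_
        rintro a b ⟨h1, h2⟩
        exact lt_of_le_of_ne h1 h2
      have h1 : (ss.filter (fun r => !known.contains r)).Pairwise (fun a b => a < b) :=
        h0.sublist (List.filter_sublist (p := fun r => !known.contains r) (l := ss))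
      refine h1.imp_of_mem ?_
      intro a b ha hb hab
      rw [key_lt_iff, hf_rank a ha, hf_rank b hb]
      exact Or.inr ⟨rfl, hab⟩
    · -- across: every canonical rank is below the sentinel
      intro a ha b hb
      rw [key_lt_iff, hk_rank a ha, hf_rank b hb]
      refine Or.inl ?_
      have := List.idxOf_lt_length_of_mem (List.mem_of_mem_filter ha)
      exact_mod_cast this
  rw [aChar roles hnd, ← hknown, ← hss, ← hys]
  exact (PySem.List.sorted_eq_of_perm_of_pairwise_lt roles ys pvKey hperm hpair).symm
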